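-- pv_equiv track=rewrite | github.com/KimMinryoung/LeninBot | db_tools.py | _classify_sql
-- ===== SOURCE A (Python) =====
-- def _classify_sql(sql: str) -> str:
--     """Return the first SQL keyword in lowercase (empty string if none)."""
--     stripped = sql.strip()
--     if not stripped:
--         return ""
--     # Strip leading comments
--     while stripped.startswith("--") or stripped.startswith("/*"):
--         if stripped.startswith("--"):
--             newline = stripped.find("\n")
--             stripped = stripped[newline + 1 :] if newline >= 0 else ""
--         else:
--             close = stripped.find("*/")
--             stripped = stripped[close + 2 :] if close >= 0 else ""
--         stripped = stripped.lstrip()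
--     first = stripped.split(None, 1)[0] if stripped else ""
--     return first.lower()
-- ===== SOURCE B (Python) =====
-- def _classify_sql(sql: str) -> str:
--     """Return the first SQL keyword in lowercase (empty string if none)."""
--     s = sql
--     n = len(s)
--     i = 0
--     # single pass: skip whitespace and comments character-by-character, no slicing
--     while i < n:
--         if s[i].isspace():
--             i += 1
--         elif s.startswith("--", i):
--             j = s.find("\n", i)
--             if j < 0:
--                 return ""
--             i = j + 1
--         elif s.startswith("/*", i):
--             j = s.find("*/", i)
--             if j < 0:
--                 return ""
--             i = j + 2
--         else:
--             break
--     j = i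
--     while j < n and not s[j].isspace():
--         j += 1
--     return s[i:j].lower()
-- ===== Notes on version B (the rewrite author's own statement) =====
-- stated objective: simpler
-- what changed: A repeatedly strips, re-slices and re-lstrips fresh string copies in a while loop; B makes a single left-to-right index scan over the original string (one whitespace/comment-skipping loop plus one token-end loop) and slices exactly once at the end.
import Mathlib
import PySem

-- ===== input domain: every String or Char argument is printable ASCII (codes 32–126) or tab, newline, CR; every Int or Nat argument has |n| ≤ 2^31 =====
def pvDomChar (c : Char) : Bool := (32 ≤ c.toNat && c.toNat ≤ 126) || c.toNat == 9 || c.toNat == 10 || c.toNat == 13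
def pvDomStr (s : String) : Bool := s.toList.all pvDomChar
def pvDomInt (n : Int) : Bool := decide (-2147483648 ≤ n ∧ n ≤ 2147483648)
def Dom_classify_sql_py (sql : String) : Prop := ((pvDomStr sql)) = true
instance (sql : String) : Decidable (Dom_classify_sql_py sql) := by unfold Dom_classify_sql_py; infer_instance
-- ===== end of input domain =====

-- B replaces A's strip + slice-and-restart while loop by a single left-to-right index scan
-- (one pass, no intermediate slice strings); same return value, simpler traversal.

-- ===== PORT A =====
-- A's 'while stripped.startswith("--") or stripped.startswith("/*")' loop.
def pvAStrip (s : List Char) : List Char :=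
  if hb : PySem.Chars.startswith s ['-', '-'] || PySem.Chars.startswith s ['/', '*'] then
    let s' :=
      if PySem.Chars.startswith s ['-', '-'] then
        let newline := PySem.Chars.find s ['\n']
        if 0 ≤ newline then PySem.List.slice s (some (newline + 1)) none else []
      else
        let close := PySem.Chars.find s ['*', '/']
        if 0 ≤ close then PySem.List.slice s (some (close + 2)) none else []
    pvAStrip (PySem.Chars.lstrip s')
  else s
termination_by s.length
decreasing_by
  have hlen : 2 ≤ s.length := by
    rcases Bool.or_eq_true_iff.mp hb with h | h <;>
      simpa using ((PySem.Chars.startswith_iff _ _).mp h).length_le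
  simp only [PySem.Chars.lstrip]
  refine lt_of_le_of_lt (List.length_dropWhile_le _ _) ?_
  split_ifs with h1 h2 h3
  · rw [PySem.List.slice_from _ (by omega)]
    simp only [List.length_drop]; omega
  · simpa using by omega
  · rw [PySem.List.slice_from _ (by omega)]
    simp only [List.length_drop]; omega
  · simpa using by omega

def classify_sql_py (sql : String) : String :=
  let stripped := PySem.Chars.strip sql.toList
  if stripped = [] then ""
  else
    let stripped2 := pvAStrip stripped
    -- 'stripped.split(None, 1)[0] if stripped else ""': the [0] is total here (the list is
    -- nonempty whenever stripped2 ≠ [], which starts with a non-space character), so headD.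
    let first := if stripped2 ≠ [] then (PySem.Chars.split₀Max stripped2 1).headD [] else []
    String.ofList (PySem.Chars.lower first)

-- ===== PORT B =====
-- B's first while loop: skip whitespace and comments, returning the index where the token
-- starts ('some i'), or 'none' for Source B's early 'return ""' on an unterminated comment.
def pvBScan (s : List Char) (i : Nat) : Option Nat :=
  if h : i < s.length then
    if PySem.Chars.isspace s[i] then pvBScan s (i + 1)
    else if PySem.Chars.startswith (s.drop i) ['-', '-'] then   -- s.startswith('--', i)
      let j := PySem.Chars.findFrom s ['\n'] (i : Int) none     -- s.find('\n', i)
      if hj : j < 0 then none else pvBScan s (j.toNat + 1)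
    else if PySem.Chars.startswith (s.drop i) ['/', '*'] then   -- s.startswith('/*', i)
      let j := PySem.Chars.findFrom s ['*', '/'] (i : Int) none -- s.find('*/', i)
      if hj : j < 0 then none else pvBScan s (j.toNat + 2)
    else some i
  else some i
termination_by s.length - i
decreasing_by
  · omega
  · have := (PySem.Chars.findFrom_natCast_spec s ['\n'] i (by omega)
      (by intro hc; exact hj (by show PySem.Chars.findFrom s ['\n'] (i : Int) none < 0; rw [hc]; omega))).1
    omega
  · have := (PySem.Chars.findFrom_natCast_spec s ['*', '/'] i (by omega)
      (by intro hc; exact hj (by show PySem.Chars.findFrom s ['*', '/'] (i : Int) none < 0; rw [hc]; omega))).1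
    omega

-- B's second while loop: advance j over the token characters.
def pvBTokEnd (s : List Char) (j : Nat) : Nat :=
  if h : j < s.length then
    if PySem.Chars.isspace s[j] then j else pvBTokEnd s (j + 1)
  else j
termination_by s.length - j

def classify_sql_py_alt (sql : String) : String :=
  let s := sql.toList
  match pvBScan s 0 with
  | none => ""
  | some i =>
    let j := pvBTokEnd s i
    String.ofList (PySem.Chars.lower (PySem.List.slice s (some (i : Int)) (some (j : Int))))

-- ===== PRECONDITION & SPEC =====
def Spec_classify_sql_py (sql : String) (out : String) : Prop := out = classify_sql_py_alt sql
instance (sql : String) (out : String) : Decidable (Spec_classify_sql_py sql out) := by unfold Spec_classify_sql_py; infer_instance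

-- ===== CLAIM (what is proved, stated in full; the proofs are below) =====
def Claim_equal_classify_sql_py : Prop := ∀ (sql : String), Dom_classify_sql_py sql → Spec_classify_sql_py sql (classify_sql_py sql)

-- ===== LEMMAS AND PROOFS =====

-- Proof-side vocabulary: the token predicate, the canonical comment skipper, and the answer.
def pvNS : Char → Bool := fun c => !PySem.Chars.isspace c

def pvSkip : List Char → Option (List Char)
  | [] => some []
  | c :: rest =>
    if PySem.Chars.isspace c then pvSkip rest
    else if PySem.Chars.startswith (c :: rest) ['-', '-'] then
      let nl := PySem.Chars.find (c :: rest) ['\n']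
      if 0 ≤ nl then pvSkip ((c :: rest).drop (nl.toNat + 1)) else none
    else if PySem.Chars.startswith (c :: rest) ['/', '*'] then
      let cl := PySem.Chars.find (c :: rest) ['*', '/']
      if 0 ≤ cl then pvSkip ((c :: rest).drop (cl.toNat + 2)) else none
    else some (c :: rest)
termination_by s => s.length
decreasing_by
  · simp
  · simp only [List.length_drop, List.length_cons]; omega
  · simp only [List.length_drop, List.length_cons]; omega

def pvAns (s : List Char) : List Char :=
  match pvSkip s with
  | none => []
  | some t => t.takeWhile pvNS

def pvFT (u : List Char) : List Char :=
  if u ≠ [] then (PySem.Chars.split₀Max u 1).headD [] else []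


-- Basic dropWhile facts specialised to this proof.
lemma pvDropWhile_self_head {p : Char → Bool} {c : Char} {v : List Char}
    (h : List.dropWhile p (c :: v) = c :: v) : p c = false := by
  by_cases hp : p c
  · exfalso
    rw [List.dropWhile_cons_of_pos hp] at h
    have := List.length_dropWhile_le p v
    have := congrArg List.length h
    simp at this; omega
  · simpa using hp

lemma pvDropWhile_take {p : Char → Bool} {l : List Char} (m : Nat)
    (h : List.dropWhile p l = l) : List.dropWhile p (l.take m) = l.take m := by
  cases l with
  | nil => simp
  | cons c v =>
    cases m with
    | zero => simp
    | succ m =>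
      have hc := pvDropWhile_self_head h
      rw [List.take_succ_cons, List.dropWhile_cons_of_neg (by simp [hc])]

-- rstrip structure
lemma pvRstrip_decomp (s : List Char) :
    ∃ t, s = PySem.Chars.rstrip s ++ t ∧ ∀ x ∈ t, PySem.Chars.isspace x = true := by
  refine ⟨(s.reverse.takeWhile PySem.Chars.isspace).reverse, ?_, ?_⟩
  · rw [PySem.Chars.rstrip, ← List.reverse_append, List.takeWhile_append_dropWhile,
      List.reverse_reverse]
  · intro x hx
    rw [List.mem_reverse] at hx
    exact List.mem_takeWhile_imp hx

lemma pvRstrip_prefix (s : List Char) : PySem.Chars.rstrip s <+: s := by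
  obtain ⟨t, ht, _⟩ := pvRstrip_decomp s
  exact ⟨t, ht.symm⟩

lemma pvRstrip_cons {c : Char} (h : PySem.Chars.isspace c = false) (v : List Char) :
    PySem.Chars.rstrip (c :: v) = c :: PySem.Chars.rstrip v := by
  rw [PySem.Chars.rstrip, PySem.Chars.rstrip, List.reverse_cons, List.dropWhile_append]
  by_cases hv : (List.dropWhile PySem.Chars.isspace v.reverse).isEmpty
  · rw [List.isEmpty_iff] at hv
    simp [hv, h]
  · simp only [hv, Bool.false_eq_true, if_false, List.reverse_append, List.reverse_cons,
      List.reverse_nil, List.nil_append, List.cons_append, List.nil_append]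

lemma pvRstrip_allspace {t : List Char} (h : ∀ x ∈ t, PySem.Chars.isspace x = true) :
    PySem.Chars.rstrip t = [] := by
  rw [PySem.Chars.rstrip, List.dropWhile_eq_nil_iff.mpr (by simpa using h)]
  rfl

lemma pvRstrip_append_space {xs t : List Char} (ht : ∀ x ∈ t, PySem.Chars.isspace x = true) :
    PySem.Chars.rstrip (xs ++ t) = PySem.Chars.rstrip xs := by
  rw [PySem.Chars.rstrip, PySem.Chars.rstrip, List.reverse_append, List.dropWhile_append,
    List.dropWhile_eq_nil_iff.mpr (by simpa using ht)]
  simp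

lemma pvRstrip_idem (s : List Char) :
    PySem.Chars.rstrip (PySem.Chars.rstrip s) = PySem.Chars.rstrip s := by
  rw [PySem.Chars.rstrip, PySem.Chars.rstrip, List.reverse_reverse]
  cases h : List.dropWhile PySem.Chars.isspace s.reverse with
  | nil => simp
  | cons c v =>
    have hc : PySem.Chars.isspace c = false := by
      have : List.dropWhile PySem.Chars.isspace (c :: v) = c :: v := by
        rw [← h]
        exact (List.dropWhile_idempotent ..)
      exact pvDropWhile_self_head this
    rw [List.dropWhile_cons_of_neg (by simp [hc])]

lemma pvRstrip_fix_drop {u : List Char} (k : Nat) (hu : PySem.Chars.rstrip u = u) :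
    PySem.Chars.rstrip (u.drop k) = u.drop k := by
  have hdw : List.dropWhile PySem.Chars.isspace u.reverse = u.reverse := by
    have := congrArg List.reverse hu
    rw [PySem.Chars.rstrip, List.reverse_reverse] at this
    exact this
  rw [PySem.Chars.rstrip, List.reverse_drop, pvDropWhile_take _ hdw, ← List.reverse_drop,
    List.reverse_reverse]

lemma pvRstrip_drop {s : List Char} (k : Nat) (hk : k ≤ (PySem.Chars.rstrip s).length) :
    (PySem.Chars.rstrip s).drop k = PySem.Chars.rstrip (s.drop k) := by
  obtain ⟨t, hst, ht⟩ := pvRstrip_decomp s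
  conv_rhs => rw [hst]
  rw [List.drop_append_of_le_length hk, pvRstrip_append_space ht,
    pvRstrip_fix_drop k (pvRstrip_idem s)]

-- lstrip facts
lemma pvLstrip_cons_space {c : Char} (h : PySem.Chars.isspace c = true) (v : List Char) :
    PySem.Chars.lstrip (c :: v) = PySem.Chars.lstrip v := by
  simp [PySem.Chars.lstrip, h]

lemma pvLstrip_cons_nonspace {c : Char} (h : PySem.Chars.isspace c = false) (v : List Char) :
    PySem.Chars.lstrip (c :: v) = c :: v := by
  simp [PySem.Chars.lstrip, h]

lemma pvLstrip_append_space {t y : List Char} (ht : ∀ x ∈ t, PySem.Chars.isspace x = true) :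
    PySem.Chars.lstrip (t ++ y) = PySem.Chars.lstrip y := by
  rw [PySem.Chars.lstrip, PySem.Chars.lstrip, List.dropWhile_append,
    List.dropWhile_eq_nil_iff.mpr ht]
  simp

lemma pvStrip_comm (x : List Char) :
    PySem.Chars.lstrip (PySem.Chars.rstrip x) = PySem.Chars.rstrip (PySem.Chars.lstrip x) := by
  have hx : x = x.takeWhile PySem.Chars.isspace ++ PySem.Chars.lstrip x := by
    rw [PySem.Chars.lstrip, List.takeWhile_append_dropWhile]
  have hw : ∀ y ∈ x.takeWhile PySem.Chars.isspace, PySem.Chars.isspace y = true :=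
    fun y hy => List.mem_takeWhile_imp hy
  cases ha : PySem.Chars.lstrip x with
  | nil =>
    have : ∀ y ∈ x, PySem.Chars.isspace y = true := by
      intro y hy
      rw [hx, ha, List.append_nil] at hy
      exact hw y hy
    rw [pvRstrip_allspace this]
    rfl
  | cons c v =>
    have hc : PySem.Chars.isspace c = false := pvDropWhile_self_head (p := PySem.Chars.isspace)
      (by rw [← ha, ← PySem.Chars.lstrip]; rw [PySem.Chars.lstrip, PySem.Chars.lstrip, List.dropWhile_idempotent])
    have hra : PySem.Chars.rstrip (c :: v) ≠ [] := by
      rw [pvRstrip_cons hc]; simp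
    have step1 : PySem.Chars.rstrip x = x.takeWhile PySem.Chars.isspace ++ PySem.Chars.rstrip (c :: v) := by
      conv_lhs => rw [hx, ha]
      rw [PySem.Chars.rstrip, List.reverse_append, List.dropWhile_append]
      have : ¬ (List.dropWhile PySem.Chars.isspace (c :: v).reverse).isEmpty := by
        rw [List.isEmpty_iff]
        intro hnil
        exact hra (by rw [PySem.Chars.rstrip, hnil]; rfl)
      simp only [this, Bool.false_eq_true, if_false, List.reverse_append, List.reverse_reverse]
      rw [PySem.Chars.rstrip]
    rw [step1]
    rw [pvLstrip_append_space hw]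

    rw [pvRstrip_cons hc]
    rw [pvLstrip_cons_nonspace hc]


-- find: first-occurrence characterisation and transfer between a string and its rstrip.
lemma pvFind_eq {s sub : List Char} (j : Nat) (hocc : sub <+: s.drop j)
    (hmin : ∀ i < j, ¬ sub <+: s.drop i) : PySem.Chars.find s sub = (j : Int) := by
  have hinf : sub <:+: s := (PySem.Chars.isIn_iff_infix sub s).mp
    ((PySem.Chars.exists_prefix_drop_iff_isIn sub s).mp ⟨j, hocc⟩)
  have hnn : 0 ≤ PySem.Chars.find s sub := (PySem.Chars.find_nonneg_iff s sub).mpr hinf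
  obtain ⟨hocc', hmin'⟩ := PySem.Chars.find_spec hnn
  rcases lt_trichotomy (PySem.Chars.find s sub).toNat j with h | h | h
  · exact absurd hocc' (hmin _ h)
  · omega
  · exact absurd hocc (hmin' j h)

lemma pvPrefix_down {u s sub : List Char} (hu : u <+: s) (i : Nat)
    (hocc : sub <+: s.drop i) (hfit : i + sub.length ≤ u.length) : sub <+: u.drop i := by
  obtain ⟨t, ht⟩ := hu
  have h1 : sub <+: u.drop i ++ t := by rw [← List.drop_append_of_le_length (by omega), ht]; exact hocc
  have h2 : sub <+: (u.drop i ++ t).take (u.drop i).length :=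
    List.prefix_take_iff.mpr ⟨h1, by simp; omega⟩
  rwa [List.take_left] at h2

lemma pvPrefix_up {u s sub : List Char} (hu : u <+: s) (i : Nat)
    (hocc : sub <+: u.drop i) : sub <+: s.drop i := hocc.trans (hu.drop i)

lemma pvOcc_fit {u t sub : List Char} (ht : ∀ x ∈ t, PySem.Chars.isspace x = true)
    (hsub : ∀ x ∈ sub, PySem.Chars.isspace x = false) (hne : sub ≠ []) (i : Nat)
    (hocc : sub <+: (u ++ t).drop i) : i + sub.length ≤ u.length := by
  by_contra hgt
  rw [not_le] at hgt
  have hslen : sub.length ≥ 1 := by cases sub <;> simp_all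
  have hlen : i + sub.length ≤ u.length + t.length := by
    have := hocc.length_le; simp at this; omega
  set k := sub.length - 1 with hk
  have hkl : k < sub.length := by omega
  have hik : i + k < (u ++ t).length := by simp; omega
  have he : sub[k]'hkl = (u ++ t)[i + k]'hik := by
    rw [hocc.getElem hkl]
    rw [List.getElem_drop]
  have hge : u.length ≤ i + k := by omega
  have hmem : (u ++ t)[i + k]'hik ∈ t := by
    rw [List.getElem_append_right hge]
    exact List.getElem_mem _
  have := ht _ hmem
  rw [← he] at this
  exact absurd this (by simp [hsub _ (List.getElem_mem hkl)])

lemma pvFind_up_found {u s sub : List Char} (hu : u <+: s)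
    (hf : 0 ≤ PySem.Chars.find u sub) :
    PySem.Chars.find s sub = PySem.Chars.find u sub := by
  obtain ⟨hocc, hmin⟩ := PySem.Chars.find_spec hf
  set j := (PySem.Chars.find u sub).toNat with hj
  have hjfit : j + sub.length ≤ u.length := by
    have h1 := hocc.length_le
    have h2 := PySem.Chars.find_le_length u sub
    simp only [List.length_drop] at h1
    omega
  have : PySem.Chars.find s sub = (j : Int) := by
    refine pvFind_eq j (pvPrefix_up hu j hocc) ?_
    intro i hi hocc'
    exact hmin i hi (pvPrefix_down hu i hocc' (by omega))
  rw [this, hj, Int.toNat_of_nonneg hf]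

lemma pvFind_none {u s sub : List Char} (hu : u <+: s)
    (hf : PySem.Chars.find s sub = -1) : PySem.Chars.find u sub = -1 := by
  rw [PySem.Chars.find_eq_neg_one_iff] at hf ⊢
  exact fun hin => hf (hin.trans hu.isInfix)

lemma pvFind_down_nonspace {u t sub : List Char} (ht : ∀ x ∈ t, PySem.Chars.isspace x = true)
    (hsub : ∀ x ∈ sub, PySem.Chars.isspace x = false) (hne : sub ≠ [])
    (hf : 0 ≤ PySem.Chars.find (u ++ t) sub) :
    PySem.Chars.find u sub = PySem.Chars.find (u ++ t) sub := by
  obtain ⟨hocc, hmin⟩ := PySem.Chars.find_spec hf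
  set j := (PySem.Chars.find (u ++ t) sub).toNat with hj
  have hfit : j + sub.length ≤ u.length := pvOcc_fit ht hsub hne j hocc
  have hupre : u <+: u ++ t := List.prefix_append u t
  have : PySem.Chars.find u sub = (j : Int) := by
    refine pvFind_eq j (pvPrefix_down hupre j hocc hfit) ?_
    intro i hi hocc'
    exact hmin i hi (pvPrefix_up hupre i hocc')
  rw [this, hj, Int.toNat_of_nonneg hf]

lemma pvFind_tail_pos {u t : List Char} (hfu : PySem.Chars.find u ['\n'] = -1)
    (hfs : 0 ≤ PySem.Chars.find (u ++ t) ['\n']) :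
    u.length ≤ (PySem.Chars.find (u ++ t) ['\n']).toNat := by
  by_contra hlt
  rw [not_le] at hlt
  obtain ⟨hocc, _⟩ := PySem.Chars.find_spec hfs
  have hupre : u <+: u ++ t := List.prefix_append u t
  have hocc' : ['\n'] <+: u.drop (PySem.Chars.find (u ++ t) ['\n']).toNat :=
    pvPrefix_down hupre _ hocc (by simp; omega)
  have hinf : ['\n'] <:+: u := hocc'.isInfix.trans (List.drop_suffix _ u).isInfix
  exact absurd hinf ((PySem.Chars.find_eq_neg_one_iff u ['\n']).mp hfu)


-- pvSkip basics
lemma pvSkip_allspace {y : List Char} (h : ∀ x ∈ y, PySem.Chars.isspace x = true) :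
    pvSkip y = some [] := by
  induction y with
  | nil => rw [pvSkip]
  | cons c v ih =>
    rw [pvSkip]
    simp only [h c (List.mem_cons_self), if_true]
    exact ih (fun x hx => h x (List.mem_cons_of_mem c hx))

lemma pvSkip_suffix : ∀ (n : Nat) (s t : List Char), s.length ≤ n →
    pvSkip s = some t → t <:+ s := by
  intro n
  induction n with
  | zero =>
    intro s t hs h
    have : s = [] := by cases s <;> simp_all
    subst this
    rw [pvSkip] at h
    simp_all
  | succ n ih =>
    intro s t hs h
    match s with
    | [] =>
      rw [pvSkip] at h; simp_all
    | c :: rest =>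
      rw [pvSkip] at h
      by_cases hc : PySem.Chars.isspace c
      · rw [if_pos hc] at h
        exact (ih rest t (by simp at hs; omega) h).trans (List.suffix_cons c rest)
      · rw [if_neg hc] at h
        by_cases hd : PySem.Chars.startswith (c :: rest) ['-', '-']
        · rw [if_pos hd] at h
          by_cases hnl : 0 ≤ PySem.Chars.find (c :: rest) ['\n']
          · rw [if_pos hnl] at h
            refine (ih _ t ?_ h).trans (List.drop_suffix _ _)
            simp only [List.length_drop, List.length_cons] at *
            omega
          · rw [if_neg hnl] at h; exact absurd h (by simp)
        · rw [if_neg hd] at h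
          by_cases hd2 : PySem.Chars.startswith (c :: rest) ['/', '*']
          · rw [if_pos hd2] at h
            by_cases hcl : 0 ≤ PySem.Chars.find (c :: rest) ['*', '/']
            · rw [if_pos hcl] at h
              refine (ih _ t ?_ h).trans (List.drop_suffix _ _)
              simp only [List.length_drop, List.length_cons] at *
              omega
            · rw [if_neg hcl] at h; exact absurd h (by simp)
          · rw [if_neg hd2] at h
            exact (Option.some_inj.mp h) ▸ List.suffix_rfl


-- Bridging B's index loops to the suffix-level pvSkip / takeWhile.
lemma pvBScan_eq : ∀ (n : Nat) (s : List Char) (i : Nat), s.length - i ≤ n → i ≤ s.length →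
    pvBScan s i = (pvSkip (s.drop i)).map (fun t => s.length - t.length) := by
  intro n
  induction n with
  | zero =>
    intro s i hn hle
    have hi : i = s.length := by omega
    rw [pvBScan, dif_neg (by omega)]
    rw [List.drop_eq_nil_iff.mpr (by omega), pvSkip]
    simp [hi]
  | succ n ih =>
    intro s i hn hle
    by_cases h : i < s.length
    · have hdrop : s.drop i = s[i] :: s.drop (i + 1) := List.drop_eq_getElem_cons h
      rw [pvBScan, dif_pos h,
        PySem.Chars.findFrom_natCast s ['\n'] i (by omega),
        PySem.Chars.findFrom_natCast s ['*', '/'] i (by omega),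
        hdrop]
      rw [pvSkip]
      by_cases hsp : PySem.Chars.isspace s[i]
      · rw [if_pos hsp, if_pos hsp, ih s (i + 1) (by omega) (by omega)]
      · rw [if_neg hsp, if_neg hsp]
        by_cases hd : PySem.Chars.startswith (s[i] :: s.drop (i + 1)) ['-', '-']
        · rw [if_pos hd, if_pos hd]
          set f := PySem.Chars.find (s[i] :: s.drop (i + 1)) ['\n'] with hfdef
          by_cases hf : f = -1
          · rw [if_pos hf, dif_pos (by omega), if_neg (by omega)]
            rfl
          · have hf0 : 0 ≤ f := by have := PySem.Chars.neg_one_le_find (s[i] :: s.drop (i + 1)) ['\n']; omega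
            have hocc := (PySem.Chars.find_spec (by rw [← hfdef] at *; exact hf0)).1
            have hflt : f.toNat < (s[i] :: s.drop (i + 1)).length := by
              have h1 := hocc.length_le
              have h2 := PySem.Chars.find_le_length (s[i] :: s.drop (i + 1)) ['\n']
              simp only [List.length_drop, List.length_cons] at *
              omega
            rw [if_neg hf, dif_neg (by omega), if_pos hf0]
            have harg : (s[i] :: s.drop (i + 1)).drop (f.toNat + 1) = s.drop (i + (f.toNat + 1)) := by
              rw [← hdrop, List.drop_drop]
            have hidx : ((i : Int) + f).toNat + 1 = i + (f.toNat + 1) := by omega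
            have hlen' : (s[i] :: s.drop (i + 1)).length = s.length - i := by
              rw [← hdrop]; simp
            rw [harg, hidx, ih s (i + (f.toNat + 1)) (by omega) (by omega)]
        · rw [if_neg hd, if_neg hd]
          by_cases hd2 : PySem.Chars.startswith (s[i] :: s.drop (i + 1)) ['/', '*']
          · rw [if_pos hd2, if_pos hd2]
            set f := PySem.Chars.find (s[i] :: s.drop (i + 1)) ['*', '/'] with hfdef
            by_cases hf : f = -1
            · rw [if_pos hf, dif_pos (by omega), if_neg (by omega)]
              rfl
            · have hf0 : 0 ≤ f := by have := PySem.Chars.neg_one_le_find (s[i] :: s.drop (i + 1)) ['*', '/']; omega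
              have hocc := (PySem.Chars.find_spec (by rw [← hfdef] at *; exact hf0)).1
              have hflt : f.toNat + 2 ≤ (s[i] :: s.drop (i + 1)).length := by
                have h1 := hocc.length_le
                have h2 := PySem.Chars.find_le_length (s[i] :: s.drop (i + 1)) ['*', '/']
                simp only [List.length_drop, List.length_cons] at *
                omega
              rw [if_neg hf, dif_neg (by omega), if_pos hf0]
              have harg : (s[i] :: s.drop (i + 1)).drop (f.toNat + 2) = s.drop (i + (f.toNat + 2)) := by
                rw [← hdrop, List.drop_drop]
              have hidx : ((i : Int) + f).toNat + 2 = i + (f.toNat + 2) := by omega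
              have hlen' : (s[i] :: s.drop (i + 1)).length = s.length - i := by
                rw [← hdrop]; simp
              rw [harg, hidx, ih s (i + (f.toNat + 2)) (by omega) (by omega)]
          · rw [if_neg hd2, if_neg hd2]
            rw [← hdrop]
            simp [List.length_drop]
            omega
    · rw [pvBScan, dif_neg h]
      rw [List.drop_eq_nil_iff.mpr (by omega), pvSkip]
      simp
      omega

lemma pvBTokEnd_eq : ∀ (n : Nat) (s : List Char) (j : Nat), s.length - j ≤ n → j ≤ s.length →
    pvBTokEnd s j = j + ((s.drop j).takeWhile pvNS).length := by
  intro n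
  induction n with
  | zero =>
    intro s j hn hle
    rw [pvBTokEnd, dif_neg (by omega), List.drop_eq_nil_iff.mpr (by omega)]
    simp
  | succ n ih =>
    intro s j hn hle
    by_cases h : j < s.length
    · have hdrop : s.drop j = s[j] :: s.drop (j + 1) := List.drop_eq_getElem_cons h
      rw [pvBTokEnd, dif_pos h, hdrop]
      by_cases hsp : PySem.Chars.isspace s[j]
      · rw [if_pos hsp, List.takeWhile_cons_of_neg (by simp [pvNS, hsp])]
        simp
      · rw [if_neg hsp, List.takeWhile_cons_of_pos (by simp [pvNS, hsp]),
          ih s (j + 1) (by omega) (by omega)]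
        simp
        omega
    · rw [pvBTokEnd, dif_neg h, List.drop_eq_nil_iff.mpr (by omega)]
      simp

lemma pvB_eq (sql : String) :
    classify_sql_py_alt sql = String.ofList (PySem.Chars.lower (pvAns sql.toList)) := by
  unfold classify_sql_py_alt
  dsimp only
  rw [pvAns]
  have hb := pvBScan_eq sql.toList.length sql.toList 0 (by omega) (by omega)
  rw [List.drop_zero] at hb
  cases hsk : pvSkip sql.toList with
  | none => rw [hb, hsk]; rfl
  | some t =>
    rw [hb, hsk]
    simp only [Option.map_some]
    obtain ⟨pre, hpre⟩ := pvSkip_suffix sql.toList.length sql.toList t (by omega) hsk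
    have hlt : t.length ≤ sql.toList.length := by rw [← hpre]; simp
    have hpl : pre.length = sql.toList.length - t.length := by
      have := congrArg List.length hpre; simp only [List.length_append] at this; omega
    have hdropt : sql.toList.drop (sql.toList.length - t.length) = t := by
      rw [← hpl, ← hpre, List.drop_left]
    rw [pvBTokEnd_eq sql.toList.length sql.toList (sql.toList.length - t.length) (by omega) (by omega),
      hdropt]
    rw [PySem.List.slice_natCast]
    rw [Nat.add_sub_cancel_left, hdropt]
    congr 2
    have hpref : t.takeWhile pvNS <+: t := List.takeWhile_prefix pvNS
    rw [← List.prefix_iff_eq_take.mp hpref]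


-- A-side: the final "split(None,1)[0]" is the first whitespace-free run, and the
-- whole of A is pvFT ∘ pvAStrip ∘ strip.
lemma pvFT_eq {c : Char} (v : List Char) (h : PySem.Chars.isspace c = false) :
    pvFT (c :: v) = (c :: v).takeWhile pvNS := by
  rw [pvFT, if_pos (by simp)]
  rw [PySem.Chars.split₀Max, if_neg (by omega)]
  have h1 : ((1 : Int)).toNat = 1 := rfl
  have hl : (c :: v).length + 1 = (v.length + 1) + 1 := by simp
  rw [h1, hl, PySem.Chars.split₀Max.go]
  rw [List.dropWhile_cons_of_neg (by simp [h])]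
  simp only [one_ne_zero, if_false]
  rw [PySem.Chars.split₀Max.go]
  cases h2 : List.dropWhile PySem.Chars.isspace (List.dropWhile (fun c => !PySem.Chars.isspace c) (c :: v)) with
  | nil => simp; rfl
  | cons d l3 => simp; rfl

lemma pvAStrip_nil : pvAStrip [] = [] := by
  rw [pvAStrip]
  simp [PySem.Chars.startswith]

lemma pvA_eq (sql : String) :
    classify_sql_py sql =
      String.ofList (PySem.Chars.lower (pvFT (pvAStrip (PySem.Chars.strip sql.toList)))) := by
  unfold classify_sql_py
  dsimp only
  by_cases h : PySem.Chars.strip sql.toList = []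
  · rw [if_pos h, h, pvAStrip_nil, pvFT]
    simp
    rfl
  · rw [if_neg h, pvFT]


lemma pvStartswith_cons_ne {a b : Char} (h : a ≠ b) (p s : List Char) :
    PySem.Chars.startswith (b :: s) (a :: p) = false := by
  rw [Bool.eq_false_iff]
  intro hx
  obtain ⟨q, hq⟩ := (PySem.Chars.startswith_iff _ _).mp hx
  injection hq with h1 _
  exact h h1

lemma pvTakeWhile_append_space {u t : List Char} (ht : ∀ x ∈ t, PySem.Chars.isspace x = true) :
    List.takeWhile pvNS (u ++ t) = List.takeWhile pvNS u := by
  rw [List.takeWhile_append]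
  by_cases hl : (u.takeWhile pvNS).length = u.length
  · rw [if_pos hl]
    have hu : u.takeWhile pvNS = u := (List.takeWhile_prefix pvNS).eq_of_length hl
    cases t with
    | nil => simp [hu]
    | cons d q =>
      rw [List.takeWhile_cons_of_neg (by simp [pvNS, ht d List.mem_cons_self])]
      simp [hu]
  · rw [if_neg hl]

-- One unfolding step of A's comment loop, and its exit.
lemma pvAStrip_step {u : List Char}
    (hb : (PySem.Chars.startswith u ['-', '-'] || PySem.Chars.startswith u ['/', '*']) = true) :
    pvAStrip u = pvAStrip (PySem.Chars.lstrip
      (if PySem.Chars.startswith u ['-', '-'] then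
        (if 0 ≤ PySem.Chars.find u ['\n'] then
          PySem.List.slice u (some (PySem.Chars.find u ['\n'] + 1)) none else [])
      else
        (if 0 ≤ PySem.Chars.find u ['*', '/'] then
          PySem.List.slice u (some (PySem.Chars.find u ['*', '/'] + 2)) none else []))) := by
  rw [pvAStrip, dif_pos hb]

lemma pvAStrip_done {u : List Char}
    (hb : (PySem.Chars.startswith u ['-', '-'] || PySem.Chars.startswith u ['/', '*']) = false) :
    pvAStrip u = u := by
  rw [pvAStrip, dif_neg (by simp [hb])]

-- The main induction: A's strip + comment loop + first token equals the canonical answer.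
lemma pvMain : ∀ (n : Nat) (s : List Char), s.length ≤ n →
    pvFT (pvAStrip (PySem.Chars.strip s)) = pvAns s := by
  intro n
  induction n with
  | zero =>
    intro s hs
    have h0 : s = [] := by cases s <;> simp_all
    subst h0
    rw [show PySem.Chars.strip [] = [] from rfl, pvAStrip_nil, pvAns, pvSkip, pvFT]
    simp
  | succ n ih =>
    intro s hs
    match s with
    | [] =>
      rw [show PySem.Chars.strip [] = [] from rfl, pvAStrip_nil, pvAns, pvSkip, pvFT]
      simp
    | c :: rest =>
      by_cases hc : PySem.Chars.isspace c
      · have h1 : PySem.Chars.strip (c :: rest) = PySem.Chars.strip rest := by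
          rw [PySem.Chars.strip, PySem.Chars.strip, pvLstrip_cons_space hc]
        have h2 : pvAns (c :: rest) = pvAns rest := by
          rw [pvAns, pvAns, pvSkip, if_pos hc]
        rw [h1, h2]
        exact ih rest (by simp at hs; omega)
      · have hcf : PySem.Chars.isspace c = false := by simpa using hc
        have hstrip : PySem.Chars.strip (c :: rest) = PySem.Chars.rstrip (c :: rest) := by
          rw [PySem.Chars.strip, pvLstrip_cons_nonspace hcf]
        obtain ⟨t, hdec, ht⟩ := pvRstrip_decomp (c :: rest)
        have hupre : PySem.Chars.rstrip (c :: rest) <+: (c :: rest) := pvRstrip_prefix _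
        have hslen : (c :: rest).length ≤ n + 1 := hs
        rw [hstrip]
        by_cases hd : PySem.Chars.startswith (c :: rest) ['-', '-']
        · -- "--" line comment at the front
          obtain ⟨w, hw⟩ := (PySem.Chars.startswith_iff _ _).mp hd
          have hw' : '-' :: '-' :: w = c :: rest := hw
          have hc1 : c = '-' := by injection hw' with a b; exact a.symm
          have hrest : rest = '-' :: w := by injection hw' with a b; exact b.symm
          have hu2 : PySem.Chars.rstrip (c :: rest) = '-' :: '-' :: PySem.Chars.rstrip w := by
            rw [hc1, hrest, pvRstrip_cons (by decide), pvRstrip_cons (by decide)]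
          have hdu : PySem.Chars.startswith (PySem.Chars.rstrip (c :: rest)) ['-', '-'] = true := by
            rw [hu2, PySem.Chars.startswith_iff]
            exact ⟨PySem.Chars.rstrip w, rfl⟩
          rw [pvAStrip_step (by rw [hdu]; rfl), if_pos hdu]
          by_cases hnl : 0 ≤ PySem.Chars.find (PySem.Chars.rstrip (c :: rest)) ['\n']
          · -- newline found inside the rstripped part: both sides drop up to it and recurse
            have hfind : PySem.Chars.find (c :: rest) ['\n'] =
                PySem.Chars.find (PySem.Chars.rstrip (c :: rest)) ['\n'] :=
              pvFind_up_found hupre hnl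
            set f := PySem.Chars.find (PySem.Chars.rstrip (c :: rest)) ['\n'] with hfdef
            have hocc := (PySem.Chars.find_spec hnl).1
            have hfit : f.toNat + 1 ≤ (PySem.Chars.rstrip (c :: rest)).length := by
              have h1 := hocc.length_le
              have h2 := PySem.Chars.find_le_length (PySem.Chars.rstrip (c :: rest)) ['\n']
              simp only [List.length_drop, List.length_cons] at *
              omega
            rw [if_pos hnl]
            rw [PySem.List.slice_from _ (by omega)]
            have htn : (f + 1).toNat = f.toNat + 1 := by omega
            rw [htn]
            rw [pvRstrip_drop (f.toNat + 1) hfit]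
            rw [pvStrip_comm]
            rw [← PySem.Chars.strip]
            have hskip : pvSkip (c :: rest) = pvSkip ((c :: rest).drop (f.toNat + 1)) := by
              rw [pvSkip, if_neg (by simp [hcf]), if_pos hd, hfind]
              show (if 0 ≤ f then pvSkip (List.drop (f.toNat + 1) (c :: rest)) else none) =
                pvSkip (List.drop (f.toNat + 1) (c :: rest))
              rw [if_pos hnl]
            have h2 : pvAns (c :: rest) = pvAns ((c :: rest).drop (f.toNat + 1)) := by
              rw [pvAns, pvAns, hskip]
            rw [h2]
            exact ih ((c :: rest).drop (f.toNat + 1)) (by simp; simp at hslen; omega)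
          · -- no newline in the rstripped part: A yields "", and B's answer is "" too
            have hfu : PySem.Chars.find (PySem.Chars.rstrip (c :: rest)) ['\n'] = -1 := by
              have := PySem.Chars.neg_one_le_find (PySem.Chars.rstrip (c :: rest)) ['\n']
              omega
            rw [if_neg hnl]
            rw [show PySem.Chars.lstrip [] = [] from rfl, pvAStrip_nil, pvFT]
            simp only [ne_eq, not_true_eq_false, if_false]
            by_cases hfs : 0 ≤ PySem.Chars.find (c :: rest) ['\n']
            · -- newline only inside the stripped trailing whitespace
              have hju : (PySem.Chars.rstrip (c :: rest)).length ≤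
                  (PySem.Chars.find (c :: rest) ['\n']).toNat := by
                have h'' := pvFind_tail_pos (t := t) hfu (by rw [← hdec]; exact hfs)
                rwa [← hdec] at h''
              set j := (PySem.Chars.find (c :: rest) ['\n']).toNat with hjdef
              have hallsp : ∀ x ∈ (c :: rest).drop (j + 1), PySem.Chars.isspace x = true := by
                intro x hx
                apply ht
                have h1 : (c :: rest).drop (j + 1) =
                    ((c :: rest).drop (PySem.Chars.rstrip (c :: rest)).length).drop
                      (j + 1 - (PySem.Chars.rstrip (c :: rest)).length) := by
                  rw [List.drop_drop]
                  congr 1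
                  omega
                have h2 : (c :: rest).drop (PySem.Chars.rstrip (c :: rest)).length = t := by
                  set L := (PySem.Chars.rstrip (c :: rest)).length with hL
                  conv_lhs => rw [hdec]
                  rw [hL, List.drop_left]
                rw [h1, h2] at hx
                exact List.mem_of_mem_drop hx
              have hskip : pvSkip (c :: rest) = some [] := by
                rw [pvSkip, if_neg (by simp [hcf]), if_pos hd]
                show (if 0 ≤ PySem.Chars.find (c :: rest) ['\n'] then
                  pvSkip (List.drop ((PySem.Chars.find (c :: rest) ['\n']).toNat + 1) (c :: rest))
                  else none) = some []
                rw [if_pos hfs]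
                exact pvSkip_allspace hallsp
              rw [pvAns, hskip]
              rfl
            · have hfs' : PySem.Chars.find (c :: rest) ['\n'] = -1 := by
                have := PySem.Chars.neg_one_le_find (c :: rest) ['\n']
                omega
              have hskip : pvSkip (c :: rest) = none := by
                rw [pvSkip, if_neg (by simp [hcf]), if_pos hd]
                show (if 0 ≤ PySem.Chars.find (c :: rest) ['\n'] then
                  pvSkip (List.drop ((PySem.Chars.find (c :: rest) ['\n']).toNat + 1) (c :: rest))
                  else none) = none
                rw [if_neg (by omega)]
              rw [pvAns, hskip]
        · -- no "--": either "/*" block comment, or no comment at all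
          by_cases hd2 : PySem.Chars.startswith (c :: rest) ['/', '*']
          · -- "/*" block comment at the front
            obtain ⟨w, hw⟩ := (PySem.Chars.startswith_iff _ _).mp hd2
            have hw' : '/' :: '*' :: w = c :: rest := hw
            have hc1 : c = '/' := by injection hw' with a b; exact a.symm
            have hu2 : PySem.Chars.rstrip (c :: rest) = '/' :: '*' :: PySem.Chars.rstrip w := by
              have hrest : rest = '*' :: w := by injection hw' with a b; exact b.symm
              rw [hc1, hrest, pvRstrip_cons (by decide), pvRstrip_cons (by decide)]
            have hdu2 : PySem.Chars.startswith (PySem.Chars.rstrip (c :: rest)) ['/', '*'] = true := by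
              rw [hu2, PySem.Chars.startswith_iff]
              exact ⟨PySem.Chars.rstrip w, rfl⟩
            have hdunot : PySem.Chars.startswith (PySem.Chars.rstrip (c :: rest)) ['-', '-'] = false := by
              rw [hu2]
              exact pvStartswith_cons_ne (by decide) _ _
            have hsubns : ∀ x ∈ ['*', '/'], PySem.Chars.isspace x = false := by
              intro x hx
              simp at hx
              rcases hx with rfl | rfl <;> rfl
            rw [pvAStrip_step (by rw [hdu2, Bool.or_true]), if_neg (by rw [hdunot]; simp)]
            by_cases hfs : 0 ≤ PySem.Chars.find (c :: rest) ['*', '/']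
            · -- "*/" present (it can only sit inside the rstripped part)
              have hfd : PySem.Chars.find (PySem.Chars.rstrip (c :: rest)) ['*', '/'] =
                  PySem.Chars.find (c :: rest) ['*', '/'] := by
                have h' : 0 ≤ PySem.Chars.find (PySem.Chars.rstrip (c :: rest) ++ t) ['*', '/'] := by
                  rw [← hdec]; exact hfs
                have h'' := pvFind_down_nonspace ht hsubns (by simp) h'
                rwa [← hdec] at h''
              set f := PySem.Chars.find (c :: rest) ['*', '/'] with hfdef
              have hnl' : 0 ≤ PySem.Chars.find (PySem.Chars.rstrip (c :: rest)) ['*', '/'] := by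
                rw [hfd]; exact hfs
              have hocc := (PySem.Chars.find_spec hnl').1
              have hfit : f.toNat + 2 ≤ (PySem.Chars.rstrip (c :: rest)).length := by
                have h1 := hocc.length_le
                have h2 := PySem.Chars.find_le_length (PySem.Chars.rstrip (c :: rest)) ['*', '/']
                rw [hfd] at h1 h2
                simp only [List.length_drop, List.length_cons] at *
                omega
              rw [if_pos hnl', hfd]
              rw [PySem.List.slice_from _ (by omega)]
              have htn : (f + 2).toNat = f.toNat + 2 := by omega
              rw [htn]
              have hfit' : f.toNat + 2 ≤ (PySem.Chars.rstrip (c :: rest)).length := hfit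
              rw [pvRstrip_drop (f.toNat + 2) hfit']
              rw [pvStrip_comm]
              rw [← PySem.Chars.strip]
              have hskip : pvSkip (c :: rest) = pvSkip ((c :: rest).drop (f.toNat + 2)) := by
                rw [pvSkip, if_neg (by simp [hcf]), if_neg hd, if_pos hd2]
                show (if 0 ≤ f then pvSkip (List.drop (f.toNat + 2) (c :: rest)) else none) =
                  pvSkip (List.drop (f.toNat + 2) (c :: rest))
                rw [if_pos hfs]
              have h2 : pvAns (c :: rest) = pvAns ((c :: rest).drop (f.toNat + 2)) := by
                rw [pvAns, pvAns, hskip]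
              rw [h2]
              exact ih ((c :: rest).drop (f.toNat + 2)) (by simp; simp at hslen; omega)
            · -- no "*/" anywhere: both yield ""
              have hfs' : PySem.Chars.find (c :: rest) ['*', '/'] = -1 := by
                have := PySem.Chars.neg_one_le_find (c :: rest) ['*', '/']
                omega
              have hfu : PySem.Chars.find (PySem.Chars.rstrip (c :: rest)) ['*', '/'] = -1 :=
                pvFind_none hupre hfs'
              rw [if_neg (by rw [hfu]; omega)]
              rw [show PySem.Chars.lstrip [] = [] from rfl, pvAStrip_nil, pvFT]
              simp only [ne_eq, not_true_eq_false, if_false]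
              have hskip : pvSkip (c :: rest) = none := by
                rw [pvSkip, if_neg (by simp [hcf]), if_neg hd, if_pos hd2]
                show (if 0 ≤ PySem.Chars.find (c :: rest) ['*', '/'] then
                  pvSkip (List.drop ((PySem.Chars.find (c :: rest) ['*', '/']).toNat + 2) (c :: rest))
                  else none) = none
                rw [if_neg (by omega)]
              rw [pvAns, hskip]
          · -- no leading comment: A stops; the first token is the same on both sides
            have hdu_not : PySem.Chars.startswith (PySem.Chars.rstrip (c :: rest)) ['-', '-'] = false := by
              rw [Bool.eq_false_iff]
              intro hx
              exact hd ((PySem.Chars.startswith_iff _ _).mpr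
                (((PySem.Chars.startswith_iff _ _).mp hx).trans hupre))
            have hdu2_not : PySem.Chars.startswith (PySem.Chars.rstrip (c :: rest)) ['/', '*'] = false := by
              rw [Bool.eq_false_iff]
              intro hx
              exact hd2 ((PySem.Chars.startswith_iff _ _).mpr
                (((PySem.Chars.startswith_iff _ _).mp hx).trans hupre))
            rw [pvAStrip_done (by rw [hdu_not, hdu2_not]; rfl)]
            have hskip : pvSkip (c :: rest) = some (c :: rest) := by
              rw [pvSkip, if_neg (by simp [hcf]), if_neg hd, if_neg hd2]
            rw [pvAns, hskip]
            have hfteq : pvFT (PySem.Chars.rstrip (c :: rest)) =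
                List.takeWhile pvNS (PySem.Chars.rstrip (c :: rest)) := by
              rw [pvRstrip_cons hcf]
              exact pvFT_eq _ hcf
            rw [hfteq]
            show List.takeWhile pvNS (PySem.Chars.rstrip (c :: rest)) =
              List.takeWhile pvNS (c :: rest)
            conv_rhs => rw [hdec]
            rw [pvTakeWhile_append_space ht]

-- ===== VERDICT (by name: the statement is the Claim_ definition above) =====
theorem classify_sql_py_spec : Claim_equal_classify_sql_py := by
  intro sql _h
  unfold Spec_classify_sql_py
  rw [pvA_eq, pvB_eq, pvMain sql.toList.length sql.toList le_rfl]
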